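-- pv_equiv track=rewrite | github.com/Vindori/misis-system-analysis | task2/task.py | analyze_graph
-- ===== SOURCE A (Python) =====
-- def analyze_graph(matrix):
--     analysis = [[0] * 5 for _ in matrix]
--     for i, row in enumerate(matrix):
--         for j, value in enumerate(row):
--             if value == 1:
--                 analysis[i][0] += 1
--                 analysis[i][2] += sum(1 for v in matrix[j] if v == 1)
--             elif value == -1:
--                 analysis[i][1] += 1
--                 analysis[i][3] += sum(1 for v in matrix[j] if v == -1)
--                 analysis[i][4] += sum(1 for k, v in enumerate(matrix[j]) if v == 1 and k != i)
--     return analysis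
-- ===== SOURCE B (Python) =====
-- def analyze_graph(matrix):
--     pos = [sum(1 for v in row if v == 1) for row in matrix]
--     neg = [sum(1 for v in row if v == -1) for row in matrix]
--     out = []
--     for i, row in enumerate(matrix):
--         a0 = a1 = a2 = a3 = a4 = 0
--         for j, v in enumerate(row):
--             if v == 1:
--                 a0 += 1
--                 a2 += pos[j]
--             elif v == -1:
--                 a1 += 1
--                 a3 += neg[j]
--                 a4 += pos[j] - (1 if i < len(matrix[j]) and matrix[j][i] == 1 else 0)
--         out.append([a0, a1, a2, a3, a4])
--     return out
-- ===== Notes on version B (the rewrite author's own statement) =====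
-- stated objective: alternative
-- what changed: B precomputes per-row counts of 1s and -1s once and looks them up in the inner loop (with a bounded correction for the k != i exclusion) instead of rescanning matrix[j] for every 1/-1 cell; the inner rescans disappear.
import Mathlib
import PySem

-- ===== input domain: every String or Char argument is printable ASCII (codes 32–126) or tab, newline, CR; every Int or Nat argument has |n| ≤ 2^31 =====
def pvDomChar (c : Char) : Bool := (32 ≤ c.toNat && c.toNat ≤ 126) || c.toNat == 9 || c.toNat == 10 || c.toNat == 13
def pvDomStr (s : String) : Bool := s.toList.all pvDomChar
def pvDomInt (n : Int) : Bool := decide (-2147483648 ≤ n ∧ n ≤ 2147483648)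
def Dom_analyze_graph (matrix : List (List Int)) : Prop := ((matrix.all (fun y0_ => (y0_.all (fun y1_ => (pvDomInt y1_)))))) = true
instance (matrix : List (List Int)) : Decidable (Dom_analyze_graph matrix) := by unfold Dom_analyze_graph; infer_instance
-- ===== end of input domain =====

-- B precomputes per-row counts of 1s and -1s once and looks them up, replacing A's inner rescans of matrix[j].

-- ===== PORT A =====
-- sum(1 for v in xs if v == t)
def pvSumEq (xs : List Int) (t : Int) : Int :=
  xs.foldl (fun a v => if v = t then a + 1 else a) 0

-- sum(1 for k, v in enumerate(xs) if v == 1 and k != i)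
def pvSumOnesExcl (xs : List Int) (i : Int) : Int :=
  (PySem.List.enumerate xs).foldl (fun a kv => if kv.2 = 1 ∧ kv.1 ≠ i then a + 1 else a) 0

-- body of A's inner loop updating analysis[i][0..4]; matrix[jv.1] is in range under Pre_
def pvStepA (matrix : List (List Int)) (i : Int)
    (acc : Int × Int × Int × Int × Int) (jv : Int × Int) : Int × Int × Int × Int × Int :=
  let mj := (PySem.List.pyGet? matrix jv.1).getD []
  if jv.2 = 1 then
    (acc.1 + 1, acc.2.1, acc.2.2.1 + pvSumEq mj 1, acc.2.2.2.1, acc.2.2.2.2)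
  else if jv.2 = -1 then
    (acc.1, acc.2.1 + 1, acc.2.2.1, acc.2.2.2.1 + pvSumEq mj (-1), acc.2.2.2.2 + pvSumOnesExcl mj i)
  else acc

def analyze_graph (matrix : List (List Int)) : List (List Int) :=
  (PySem.List.enumerate matrix).map (fun p =>
    let r := (PySem.List.enumerate p.2).foldl (pvStepA matrix p.1) (0, 0, 0, 0, 0)
    [r.1, r.2.1, r.2.2.1, r.2.2.2.1, r.2.2.2.2])

-- ===== PORT B =====
-- body of B's inner loop: lookups in the precomputed pos/neg count lists
def pvStepB (pos neg : List Int) (matrix : List (List Int)) (i : Int)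
    (acc : Int × Int × Int × Int × Int) (jv : Int × Int) : Int × Int × Int × Int × Int :=
  if jv.2 = 1 then
    (acc.1 + 1, acc.2.1, acc.2.2.1 + PySem.List.pyGetD pos jv.1 0, acc.2.2.2.1, acc.2.2.2.2)
  else if jv.2 = -1 then
    (acc.1, acc.2.1 + 1, acc.2.2.1, acc.2.2.2.1 + PySem.List.pyGetD neg jv.1 0,
      acc.2.2.2.2 + (PySem.List.pyGetD pos jv.1 0 -
        (if PySem.List.pyGet? ((PySem.List.pyGet? matrix jv.1).getD []) i = some 1 then 1 else 0)))
  else acc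

def analyze_graph_alt (matrix : List (List Int)) : List (List Int) :=
  let pos := matrix.map (fun row => pvSumEq row 1)
  let neg := matrix.map (fun row => pvSumEq row (-1))
  (PySem.List.enumerate matrix).map (fun p =>
    let r := (PySem.List.enumerate p.2).foldl (pvStepB pos neg matrix p.1) (0, 0, 0, 0, 0)
    [r.1, r.2.1, r.2.2.1, r.2.2.2.1, r.2.2.2.2])

-- ===== PRECONDITION & SPEC =====
-- Pre_ excludes exactly the inputs on which A raises IndexError: a row holding a 1 or -1 at
-- a column index ≥ the number of rows (then A indexes matrix[j] out of range).
def Pre_analyze_graph (matrix : List (List Int)) : Prop :=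
  ∀ row ∈ matrix, ∀ j : Fin row.length, (row[j] = 1 ∨ row[j] = -1) → (j : Nat) < matrix.length
instance (matrix : List (List Int)) : Decidable (Pre_analyze_graph matrix) := by
  unfold Pre_analyze_graph; infer_instance

def pvWitness_analyze_graph : List (List Int) := [[1, -1], [0, 1]]

def Spec_analyze_graph (matrix : List (List Int)) (out : List (List Int)) : Prop := out = analyze_graph_alt matrix
instance (matrix : List (List Int)) (out : List (List Int)) : Decidable (Spec_analyze_graph matrix out) := by unfold Spec_analyze_graph; infer_instance

-- ===== CLAIM (what is proved, stated in full; the proofs are below) =====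
def Claim_equal_analyze_graph : Prop := ∀ (matrix : List (List Int)), Dom_analyze_graph matrix → Pre_analyze_graph matrix → Spec_analyze_graph matrix (analyze_graph matrix)

-- ===== LEMMAS AND PROOFS =====

-- the two counting folds are countP
theorem pvSumEq_eq_countP (xs : List Int) (t : Int) :
    pvSumEq xs t = (xs.countP (fun v => decide (v = t)) : Int) := by
  simpa using PySem.List.foldl_ite_add_one (l := xs) (a := 0) (p := fun v => v = t)

theorem pvSumOnesExcl_eq_countP (xs : List Int) (i : Int) :
    pvSumOnesExcl xs i
      = (((PySem.List.enumerate xs).countP (fun kv => decide (kv.2 = 1 ∧ kv.1 ≠ i))) : Int) := by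
  simpa using PySem.List.foldl_ite_add_one (l := PySem.List.enumerate xs) (a := 0)
    (p := fun kv => kv.2 = 1 ∧ kv.1 ≠ i)

-- counting 1s at positions ≠ i equals the count of 1s minus an indicator for position i
theorem countExcl (i : Int) (xs : List Int) : ∀ s : Int,
    (((PySem.List.enumerate xs s).countP (fun kv => decide (kv.2 = 1 ∧ kv.1 ≠ i))) : Int)
      = (xs.countP (fun v => decide (v = 1)) : Int)
        - (if s ≤ i ∧ xs[(i - s).toNat]? = some 1 then 1 else 0) := by
  induction xs with
  | nil => intro s; simp [PySem.List.enumerate]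
  | cons x xs ih =>
    intro s
    rw [PySem.List.enumerate_cons, List.countP_cons, List.countP_cons]
    push_cast
    rw [ih (s + 1)]
    by_cases hsi : s = i
    · have h0 : (i - s).toNat = 0 := by omega
      simp only [h0, List.getElem?_cons_zero]
      have hd : (decide ((s, x).2 = 1 ∧ (s, x).1 ≠ i)) = false := by simp [hsi]
      rw [hd]
      by_cases hx : x = 1 <;>
        simp [hx, show s ≤ i by omega, show ¬ (s + 1 ≤ i) by omega]
    · have hhead : (decide (x = 1 ∧ (s : Int) ≠ i)) = decide (x = 1) := by
        by_cases hx : x = 1 <;> simp [hx, hsi]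
      rw [hhead]
      by_cases hle : s + 1 ≤ i
      · have hn : (i - s).toNat = (i - (s + 1)).toNat + 1 := by omega
        rw [hn, List.getElem?_cons_succ]
        by_cases hx : x = 1 <;> simp [hx, hle, show s ≤ i by omega] <;> try omega
      · have hle2 : ¬ s ≤ i := by omega
        by_cases hx : x = 1 <;> simp [hx, hle, hle2]

theorem pvSumOnesExcl_eq (xs : List Int) (k : Nat) :
    pvSumOnesExcl xs (k : Int)
      = pvSumEq xs 1 - (if PySem.List.pyGet? xs (k : Int) = some 1 then 1 else 0) := by
  rw [pvSumOnesExcl_eq_countP, pvSumEq_eq_countP]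
  have := countExcl (k : Int) xs 0
  rw [show PySem.List.enumerate xs = PySem.List.enumerate xs 0 from rfl, this]
  simp [PySem.List.pyGet?_natCast]

-- the pos/neg lookup lists return the corresponding per-row counts
theorem pyGetD_map_count (matrix : List (List Int)) (t : Int) (j : Nat) (hj : j < matrix.length) :
    PySem.List.pyGetD (matrix.map (fun row => pvSumEq row t)) (j : Int) 0
      = pvSumEq matrix[j] t := by
  rw [PySem.List.pyGetD_natCast]
  simp [List.getD, hj]

theorem step_eq (matrix : List (List Int)) (hpre : Pre_analyze_graph matrix)
    (row : List Int) (hrow : row ∈ matrix) (k : Nat)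
    (acc : Int × Int × Int × Int × Int) (jv : Int × Int)
    (hjv : jv ∈ PySem.List.enumerate row) :
    pvStepA matrix (k : Int) acc jv
      = pvStepB (matrix.map (fun r => pvSumEq r 1)) (matrix.map (fun r => pvSumEq r (-1)))
          matrix (k : Int) acc jv := by
  rcases (PySem.List.mem_enumerate_iff _ _ _).1 hjv with ⟨j, hj, rfl⟩
  simp only [zero_add]
  by_cases h1 : row[j] = 1
  · have hjm : j < matrix.length := hpre row hrow ⟨j, hj⟩ (Or.inl h1)
    simp [pvStepA, pvStepB, h1, pyGetD_map_count matrix 1 j hjm, List.getElem?_eq_getElem hjm]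
  · by_cases h2 : row[j] = -1
    · have hjm : j < matrix.length := hpre row hrow ⟨j, hj⟩ (Or.inr h2)
      simp [pvStepA, pvStepB, h2, pyGetD_map_count matrix 1 j hjm,
        pyGetD_map_count matrix (-1) j hjm, List.getElem?_eq_getElem hjm,
        pvSumOnesExcl_eq matrix[j] k]
    · simp [pvStepA, pvStepB, h1, h2]

-- ===== VERDICT (by name: the statement is the Claim_ definition above) =====
theorem analyze_graph_spec : Claim_equal_analyze_graph := by
  intro matrix _ hpre
  unfold Spec_analyze_graph analyze_graph analyze_graph_alt
  apply List.map_congr_left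
  intro p hp
  rcases (PySem.List.mem_enumerate_iff _ _ _).1 hp with ⟨k, hk, rfl⟩
  simp only [zero_add]
  have hfold := PySem.List.foldl_congr_mem
    (l := PySem.List.enumerate matrix[k]) (init := ((0 : Int), (0 : Int), (0 : Int), (0 : Int), (0 : Int)))
    (f := pvStepA matrix (k : Int))
    (g := pvStepB (matrix.map (fun r => pvSumEq r 1)) (matrix.map (fun r => pvSumEq r (-1))) matrix (k : Int))
    (fun acc x hx => step_eq matrix hpre matrix[k] (List.getElem_mem hk) k acc x hx)
  rw [hfold]
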